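-- pv_equiv track=rewrite | github.com/Data-Lama/covid_geoinsights_pipeline | pipeline_scripts/analysis/choropleth_maps.py | construct_legend
-- ===== SOURCE A (Python) =====
-- def construct_legend(bins):
--        l = []
--        for i in range(len(bins)):
--               if i == 0:
--                      label = "(-10, {}]".format(bins[i])
--               else:
--                      label = "({}, {}]".format(bins[i-1], bins[i])
--               l.append(label)
--        return l
-- ===== SOURCE B (Python) =====
-- def construct_legend(bins):
--     labels = []
--     rest = list(bins)
--     while len(rest) > 1:
--         hi = rest.pop()
--         labels.append("({}, {}]".format(rest[-1], hi))
--     if rest: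
--         labels.append("(-10, {}]".format(rest[0]))
--     labels.reverse()
--     return labels
-- ===== Notes on version B (the rewrite author's own statement) =====
-- stated objective: alternative
-- what changed: Builds the labels back-to-front by repeatedly popping the last boundary off a working copy (pairing it with the new last element), handling the leftover first boundary with the -10 sentinel, then reversing the accumulated labels, instead of A's forward indexed loop with an i==0 branch.
import Mathlib
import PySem

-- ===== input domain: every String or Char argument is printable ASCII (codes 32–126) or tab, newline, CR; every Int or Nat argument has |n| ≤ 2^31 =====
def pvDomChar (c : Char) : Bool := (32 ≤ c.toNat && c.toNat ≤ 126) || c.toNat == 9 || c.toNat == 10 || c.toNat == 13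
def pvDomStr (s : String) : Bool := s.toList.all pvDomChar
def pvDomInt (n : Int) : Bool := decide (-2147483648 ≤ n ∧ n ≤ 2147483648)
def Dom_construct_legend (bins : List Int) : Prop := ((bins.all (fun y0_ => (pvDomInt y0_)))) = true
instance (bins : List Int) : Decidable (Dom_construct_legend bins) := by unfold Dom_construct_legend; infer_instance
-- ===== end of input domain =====

-- B builds the labels back-to-front: it pops boundaries off a working copy from the end, pairing each with
-- the new last element, appends the sentinel -10 label for the leftover head, and reverses (objective: alternative).

-- ===== PORT A =====
-- the loop body's label for index i
def pvLabelA (bins : List Int) (i : Int) : String :=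
  if i == 0 then
    "(-10, " ++ PySem.Int.toStr (PySem.List.pyGetD bins i 0) ++ "]"
  else
    "(" ++ PySem.Int.toStr (PySem.List.pyGetD bins (i - 1) 0) ++ ", " ++
      PySem.Int.toStr (PySem.List.pyGetD bins i 0) ++ "]"

def construct_legend (bins : List Int) : List String :=
  (PySem.List.pyRange 0 (bins.length : Int) 1).foldl
    (fun l i => l ++ [pvLabelA bins i]) []

-- ===== PORT B =====
-- "({}, {}]".format(lo, hi)
def pvFmt (lo hi : Int) : String :=
  "(" ++ PySem.Int.toStr lo ++ ", " ++ PySem.Int.toStr hi ++ "]"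

-- the while loop: state (labels, rest); rest.pop() is exact as 'last element + dropLast'
def pvWhile (labels : List String) (rest : List Int) : List String × List Int :=
  if rest.length > 1 then
    let hi := PySem.List.pyGetD rest (-1) 0
    let rest' := rest.dropLast
    pvWhile (labels ++ [pvFmt (PySem.List.pyGetD rest' (-1) 0) hi]) rest'
  else (labels, rest)
termination_by rest.length
decreasing_by simp [List.length_dropLast]; omega

def construct_legend_alt (bins : List Int) : List String :=
  let p := pvWhile [] bins
  let labels :=
    match p.2 with
    | [] => p.1
    | x :: _ => p.1 ++ ["(-10, " ++ PySem.Int.toStr x ++ "]"]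
  labels.reverse

-- ===== PRECONDITION & SPEC =====
def Spec_construct_legend (bins : List Int) (out : List String) : Prop := out = construct_legend_alt bins
instance (bins : List Int) (out : List String) : Decidable (Spec_construct_legend bins out) := by unfold Spec_construct_legend; infer_instance

-- ===== CLAIM (what is proved, stated in full; the proofs are below) =====
def Claim_equal_construct_legend : Prop := ∀ (bins : List Int), Dom_construct_legend bins → Spec_construct_legend bins (construct_legend bins)

-- ===== LEMMAS AND PROOFS =====
theorem foldl_append_singleton {α β : Type} (f : α → β) (xs : List α) (acc : List β) :
    xs.foldl (fun l i => l ++ [f i]) acc = acc ++ xs.map f := by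
  induction xs generalizing acc with
  | nil => simp
  | cons x xs ih => simp [List.foldl, ih]

-- A's loop computes the zipWith of lower bounds (-10 :: dropLast) with bins
theorem A_eq_zipWith (bins : List Int) :
    construct_legend bins =
      List.zipWith pvFmt (-10 :: bins.dropLast) bins := by
  unfold construct_legend
  rw [foldl_append_singleton]
  simp only [List.nil_append]
  apply List.ext_getElem
  · simp [PySem.List.length_pyRange_one]
    omega
  · intro k hk1 hk2
    simp only [List.getElem_map, PySem.List.getElem_pyRange_one, List.getElem_zipWith]
    simp [PySem.List.length_pyRange_one] at hk1
    cases k with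
    | zero =>
      simp only [pvLabelA, pvFmt, Nat.cast_zero, add_zero, beq_self_eq_true, if_pos]
      rw [show (0:Int) = ((0:Nat):Int) from rfl, PySem.List.pyGetD_natCast]
      simp only [List.getD_eq_getElem?_getD, List.getElem?_eq_getElem hk1, Option.getD_some,
        List.getElem_cons_zero]
      rw [show ("(" ++ PySem.Int.toStr (-10) ++ ", " : String) = "(-10, " from by decide]
    | succ k =>
      simp only [pvLabelA, pvFmt]
      rw [if_neg (by simp; omega)]
      rw [show (0:Int) + (((k+1:Nat)):Int) - 1 = ((k:Nat):Int) by push_cast; omega]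
      rw [show (0:Int) + (((k+1:Nat)):Int) = (((k+1:Nat)):Int) by ring]
      rw [PySem.List.pyGetD_natCast, PySem.List.pyGetD_natCast]
      simp only [List.getD_eq_getElem?_getD, List.getElem?_eq_getElem hk1,
        List.getElem?_eq_getElem (show k < bins.length by omega), Option.getD_some]
      rw [List.getElem_cons_succ]
      rw [List.getElem_dropLast]

-- zipping a nonempty list against its tail extended by y peels off the last pair
theorem zip_tail_snoc : ∀ (l : List Int) (h : l ≠ []) (y : Int),
    List.zipWith pvFmt l (l.tail ++ [y]) =
      List.zipWith pvFmt l.dropLast l.tail ++ [pvFmt (l.getLast h) y] := by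
  intro l
  induction l with
  | nil => intro h; exact absurd rfl h
  | cons a l' ih =>
    intro _ y
    cases l' with
    | nil => simp
    | cons b l'' =>
      have := ih (by simp) y
      simp only [List.tail_cons] at this ⊢
      simp [this]

-- B's while loop: labels accumulated are the reversed zipWith of adjacent pairs; rest ends as take 1
theorem pvWhile_spec (rest : List Int) : ∀ (labels : List String),
    pvWhile labels rest =
      (labels ++ (List.zipWith pvFmt rest.dropLast rest.tail).reverse, rest.take 1) := by
  induction rest using List.reverseRecOn with
  | nil => intro labels; rw [pvWhile]; simp
  | append_singleton ys y ih =>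
    intro labels
    cases ys with
    | nil => rw [pvWhile]; simp
    | cons a ys' =>
      rw [pvWhile]
      rw [if_pos (by simp)]
      simp only [List.dropLast_concat]
      rw [ih]
      have hne : (a :: ys') ≠ [] := by simp
      rw [Prod.mk.injEq]
      refine ⟨?_, ?_⟩
      · rw [PySem.List.pyGetD_neg_one_append_singleton,
          PySem.List.pyGetD_neg_one (a :: ys') 0 hne]
        rw [show ((a :: ys') ++ [y]).tail = (a :: ys').tail ++ [y] from by simp,
          zip_tail_snoc (a :: ys') hne y]
        simp
      · cases ys' <;> simp

theorem construct_legend_spec : Claim_equal_construct_legend := by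
  intro bins _
  unfold Spec_construct_legend
  rw [A_eq_zipWith]
  unfold construct_legend_alt
  rw [pvWhile_spec]
  cases bins with
  | nil => simp
  | cons h t =>
    simp only [List.take_succ_cons, List.take_zero, List.tail_cons, List.nil_append,
      List.reverse_append, List.reverse_reverse, List.reverse_cons, List.reverse_nil,
      List.nil_append, List.zipWith_cons_cons]
    rw [show ("(-10, " ++ PySem.Int.toStr h ++ "]") = pvFmt (-10) h from by
      simp only [pvFmt]
      rw [show ("(" ++ PySem.Int.toStr (-10) ++ ", " : String) = "(-10, " from by decide]]
    simp
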